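-- pv_equiv track=rewrite | github.com/seekho123/gitbasics | recurive_dig.py | distr_of_rec_digit_sums
-- ===== SOURCE A (Python) =====
-- def rec_dig_sum(n):
--     '''
--     Returns the recursive digit sum of an integer.
--
--     Parameter
--     ---------
--     n: int
--
--     Returns
--     -------
--     rec_dig_sum: int
--        the recursive digit sum of the input n
--     '''
--     n_digits = [int(d) for d in str(n)]
--
--     if len(n_digits) == 1:
--     	return n
--
--
--     d_sum = 0
--
--     for i in n_digits:
--       d_sum += i
--
--     ds = rec_dig_sum (d_sum)
--
--     return ds
--
-- def distr_of_rec_digit_sums(low=0, high=1500):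
--     '''
--     Returns a dictionary representing the counts
--     of recursive digit sums within a given range.
--
--     Parameters
--     ----------
--     low: int
--         a positive integer representing the lowest
--         value in the range of integers for which finding
--         the recursive digit sum
--     high: int
--         a positive integer greater than low, the inclusive
--         upper bound for which finding the recursive digit sum
--
--     Returns
--     -------
--     dict_of_rec_dig_sums: {int:int}
--         returns a dictionary where the keys are the recursive
--         digit sums and the values are the counts of those digit sums
--         occurring
--     '''
--
--     dic = dict()
--
--     for i in range(low, high+1):
--       d_sum = rec_dig_sum(i)
--       print (d_sum)
--       if d_sum not in dic.keys():
--         dic[d_sum]= 1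
--       else:
--         dic[d_sum] +=1
--
--     return dic
-- ===== SOURCE B (Python) =====
-- def distr_of_rec_digit_sums(low=0, high=1500):
--     counts = {}
--     for i in range(low, high + 1):
--         r = i if i < 10 else 1 + (i - 1) % 9   # closed-form digital root: no string digits, no recursion
--         print(r)
--         counts[r] = counts.get(r, 0) + 1
--     return counts
-- ===== Notes on version B (the rewrite author's own statement) =====
-- stated objective: alternative
-- what changed: Replaces the recursive string-based digit-sum helper by the closed-form digital root (i if i<10 else 1+(i-1)%9) and tallies with dict.get, removing all string conversion and recursion from the loop body.
import Mathlib
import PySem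

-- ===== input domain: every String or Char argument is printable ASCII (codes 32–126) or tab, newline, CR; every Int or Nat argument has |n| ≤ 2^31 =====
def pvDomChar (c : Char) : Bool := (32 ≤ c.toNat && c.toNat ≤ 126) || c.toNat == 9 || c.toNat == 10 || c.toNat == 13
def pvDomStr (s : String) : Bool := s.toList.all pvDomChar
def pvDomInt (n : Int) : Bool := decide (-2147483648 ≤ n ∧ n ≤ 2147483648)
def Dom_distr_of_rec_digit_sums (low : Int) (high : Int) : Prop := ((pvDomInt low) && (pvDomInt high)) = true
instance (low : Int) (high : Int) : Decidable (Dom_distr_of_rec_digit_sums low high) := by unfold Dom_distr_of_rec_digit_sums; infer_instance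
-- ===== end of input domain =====

-- B replaces the string-based recursive digit sum by the closed-form digital-root formula (1 + (i-1) % 9);
-- equivalence is about the RETURN value only (both Pythons also print each digit sum; that side effect is not modelled).

-- ===== PORT A =====
-- rec_dig_sum: n_digits = [int(d) for d in str(n)]; if one digit return n; else sum and recurse.
-- The Nat fuel is ONLY a totality guard for Lean (Python's recursion); on Pre_ (0 ≤ n) the digit sum
-- strictly decreases, so fuel n.natAbs + 1 is never exhausted.  int(d) is PySem.Int.ofChars? [d];
-- it is none only for the '-' of a negative n (Python's ValueError), excluded by Pre_.
def pvRecDigSumFuel : Nat → Int → Int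
  | 0, n => n
  | f+1, n =>
    let n_digits := (PySem.Int.toChars n).map (fun d => (PySem.Int.ofChars? [d]).getD 0)
    if n_digits.length = 1 then n
    else pvRecDigSumFuel f (n_digits.foldl (fun a i => a + i) 0)

def rec_dig_sum (n : Int) : Int := pvRecDigSumFuel (n.natAbs + 1) n

def distr_of_rec_digit_sums (low : Int) (high : Int) : List (Int × Int) :=
  ((PySem.List.pyRange low (high+1) 1).foldl
    (fun dic i =>
      let d_sum := rec_dig_sum i
      if dic.contains d_sum = false then dic.insert d_sum 1
      else dic.insert d_sum (dic.getD d_sum 0 + 1))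
    (PySem.Dict.empty : PySem.Dict Int Int)).items

-- ===== PORT B =====
def distr_of_rec_digit_sums_alt (low : Int) (high : Int) : List (Int × Int) :=
  ((PySem.List.pyRange low (high+1) 1).foldl
    (fun counts i =>
      let r := if i < 10 then i else 1 + PySem.Int.mod (i - 1) 9
      counts.insert r (counts.getD r 0 + 1))
    (PySem.Dict.empty : PySem.Dict Int Int)).items

-- ===== PRECONDITION & SPEC =====
-- Pre_ excludes exactly the inputs where Python A raises: a nonempty range starting below 0
-- makes int('-') raise ValueError inside rec_dig_sum.
def Pre_distr_of_rec_digit_sums (low : Int) (high : Int) : Prop := 0 ≤ low ∨ high < low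
instance (low : Int) (high : Int) : Decidable (Pre_distr_of_rec_digit_sums low high) := by
  unfold Pre_distr_of_rec_digit_sums; infer_instance

def pvWitness_distr_of_rec_digit_sums : Int × Int := (0, 12)

def Spec_distr_of_rec_digit_sums (low : Int) (high : Int) (out : List (Int × Int)) : Prop := out = distr_of_rec_digit_sums_alt low high
instance (low : Int) (high : Int) (out : List (Int × Int)) : Decidable (Spec_distr_of_rec_digit_sums low high out) := by unfold Spec_distr_of_rec_digit_sums; infer_instance

-- ===== CLAIM (what is proved, stated in full; the proofs are below) =====
def Claim_equal_distr_of_rec_digit_sums : Prop := ∀ (low : Int) (high : Int), Dom_distr_of_rec_digit_sums low high → Pre_distr_of_rec_digit_sums low high → Spec_distr_of_rec_digit_sums low high (distr_of_rec_digit_sums low high)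

-- ===== LEMMAS AND PROOFS =====

-- decimal digit characters of a Nat, most significant first (= Nat.toDigits 10)
def pvDigs (n : Nat) : List Char :=
  if _h : n < 10 then [Nat.digitChar n]
  else pvDigs (n / 10) ++ [Nat.digitChar (n % 10)]
  decreasing_by exact Nat.div_lt_self (by omega) (by omega)

-- decimal digit sum of a Nat
def pvDigsum (n : Nat) : Nat :=
  if h : n < 10 then n
  else pvDigsum (n / 10) + n % 10
  decreasing_by exact Nat.div_lt_self (by omega) (by omega)

theorem pvToDigitsCore_eq : ∀ (fuel n : Nat) (acc : List Char), n < fuel →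
    Nat.toDigitsCore 10 fuel n acc = pvDigs n ++ acc := by
  intro fuel
  induction fuel with
  | zero => intro n acc h; omega
  | succ f ih =>
    intro n acc h
    rw [Nat.toDigitsCore]
    by_cases h10 : n < 10
    · have : n / 10 = 0 := Nat.div_eq_of_lt h10
      simp [this, pvDigs, h10, Nat.mod_eq_of_lt h10]
    · have hne : n / 10 ≠ 0 := by
        intro hz; exact h10 (by omega : n < 10)
      have hlt : n / 10 < f := by
        have := Nat.div_lt_self (by omega : 0 < n) (by omega : 1 < 10)
        omega
      simp only [hne, if_false]
      rw [ih (n / 10) _ hlt]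
      conv_rhs => rw [pvDigs]
      simp [h10]

theorem pvToChars_eq (n : Nat) : PySem.Int.toChars (n : Int) = pvDigs n := by
  rw [PySem.Int.toChars]
  rw [if_neg (by omega : ¬ ((n : Int) < 0))]
  have ht : ((n : Int)).toNat = n := by omega
  rw [ht, Nat.toDigits, pvToDigitsCore_eq (n + 1) n [] (by omega), List.append_nil]

theorem pvParse_digitChar (d : Nat) (h : d < 10) :
    (PySem.Int.ofChars? [Nat.digitChar d]).getD 0 = (d : Int) := by
  interval_cases d <;> decide

theorem pvDigs_parse_sum (n : Nat) :
    ((pvDigs n).map (fun d => (PySem.Int.ofChars? [d]).getD 0)).foldl (fun a i => a + i) 0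
      = (pvDigsum n : Int) := by
  induction n using Nat.strong_induction_on with
  | _ n ih =>
    by_cases h : n < 10
    · rw [pvDigs, pvDigsum]
      simp [h, pvParse_digitChar n h]
    · rw [pvDigs, pvDigsum]
      simp only [h, dite_false, List.map_append, List.foldl_append]
      rw [ih (n / 10) (Nat.div_lt_self (by omega) (by omega))]
      simp [pvParse_digitChar (n % 10) (Nat.mod_lt n (by omega))]

theorem pvDigs_ne_nil (n : Nat) : pvDigs n ≠ [] := by
  rw [pvDigs]; split <;> simp

theorem pvDigs_length_one_iff (n : Nat) : (pvDigs n).length = 1 ↔ n < 10 := by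
  rw [pvDigs]
  split
  · rename_i h; simp [h]
  · rename_i h
    have hp := List.length_pos_iff.mpr (pvDigs_ne_nil (n / 10))
    simp only [List.length_append, List.length_singleton]
    constructor <;> (intro; omega)

theorem pvDigsum_le (n : Nat) : pvDigsum n ≤ n := by
  induction n using Nat.strong_induction_on with
  | _ n ih =>
    rw [pvDigsum]
    split
    · omega
    · rename_i h
      have := ih (n / 10) (Nat.div_lt_self (by omega) (by omega))
      omega

theorem pvDigsum_lt (n : Nat) (h : 10 ≤ n) : pvDigsum n < n := by
  rw [pvDigsum]
  simp only [show ¬ n < 10 by omega, dite_false]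
  have := pvDigsum_le (n / 10)
  omega

theorem pvDigsum_pos (n : Nat) (h : 1 ≤ n) : 1 ≤ pvDigsum n := by
  induction n using Nat.strong_induction_on with
  | _ n ih =>
    rw [pvDigsum]
    split
    · omega
    · rename_i hn
      have := ih (n / 10) (Nat.div_lt_self (by omega) (by omega)) (by omega)
      omega

theorem pvDigsum_mod9 (n : Nat) : pvDigsum n % 9 = n % 9 := by
  induction n using Nat.strong_induction_on with
  | _ n ih =>
    rw [pvDigsum]
    split
    · rfl
    · rename_i h
      have := ih (n / 10) (Nat.div_lt_self (by omega) (by omega))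
      omega

-- B's per-element value, as a function (only used in the proofs)
theorem pvDroot_cast (m : Nat) (h : 1 ≤ m) :
    (if (m : Int) < 10 then (m : Int) else 1 + PySem.Int.mod ((m : Int) - 1) 9)
      = 1 + ((m : Int) - 1) % 9 := by
  split
  · rename_i hm
    have hm' : m < 10 := by exact_mod_cast hm
    omega
  · rw [PySem.Int.mod_eq_emod_of_pos (by omega)]

theorem pvRecFuel_eq : ∀ (f : Nat) (n : Nat), n < f →
    pvRecDigSumFuel f (n : Int)
      = (if (n : Int) < 10 then (n : Int) else 1 + PySem.Int.mod ((n : Int) - 1) 9) := by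
  intro f
  induction f with
  | zero => intro n h; omega
  | succ f ih =>
    intro n h
    rw [pvRecDigSumFuel]
    simp only [pvToChars_eq]
    by_cases h10 : n < 10
    · simp [pvDigs_length_one_iff, List.length_map, h10, show (n : Int) < 10 by exact_mod_cast h10]
    · have hlen : ¬ ((pvDigs n).map (fun d => (PySem.Int.ofChars? [d]).getD 0)).length = 1 := by
        simp [List.length_map, pvDigs_length_one_iff, h10]
      simp only [hlen, if_false, pvDigs_parse_sum]
      have hds : pvDigsum n < f := by
        have := pvDigsum_lt n (by omega)
        omega
      rw [ih (pvDigsum n) hds]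
      rw [pvDroot_cast (pvDigsum n) (pvDigsum_pos n (by omega))]
      have h1 : ¬ ((n : Int) < 10) := by exact_mod_cast h10
      simp only [h1, if_false]
      rw [PySem.Int.mod_eq_emod_of_pos (by omega : (0:Int) < 9)]
      have hmod := pvDigsum_mod9 n
      have hpos := pvDigsum_pos n (by omega)
      omega

theorem pvRecDigSum_eq (i : Int) (h : 0 ≤ i) :
    rec_dig_sum i = (if i < 10 then i else 1 + PySem.Int.mod (i - 1) 9) := by
  have hi : i = (i.toNat : Int) := by omega
  rw [rec_dig_sum, hi]
  have : ((i.toNat : Int)).natAbs = i.toNat := by omega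
  rw [this]
  exact pvRecFuel_eq (i.toNat + 1) i.toNat (by omega)

-- ===== VERDICT (by name: the statement is the Claim_ definition above) =====
theorem distr_of_rec_digit_sums_spec : Claim_equal_distr_of_rec_digit_sums := by
  intro low high _ hpre
  unfold Spec_distr_of_rec_digit_sums distr_of_rec_digit_sums distr_of_rec_digit_sums_alt
  rcases hpre with hlow | hempty
  · congr 1
    apply PySem.List.foldl_congr_mem
    intro acc x hx
    have hx0 : 0 ≤ x := le_trans hlow (PySem.List.mem_pyRange_one.mp hx).1
    simp only [pvRecDigSum_eq x hx0]
    by_cases hc : acc.contains (if x < 10 then x else 1 + PySem.Int.mod (x - 1) 9) = false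
    · rw [if_pos hc, PySem.Dict.getD_of_not_contains _ _ hc]
      norm_num
    · rw [if_neg hc]
  · rw [PySem.List.pyRange_one_eq_nil (by omega)]
    rfl
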